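-- pv_equiv track=rewrite | github.com/Sonu-Suman/Tutorial7243 | Array/DeleteDuplicate.py | solve
-- ===== SOURCE A (Python) =====
-- def solve(arr):
--     s = set()
--     l = []
--
--     for i in arr:
--         if i in s:
--             l.append(i)
--         s.add(i)
--
--     return l
-- ===== SOURCE B (Python) =====
-- def solve(arr):
--     # Two passes: build a first-occurrence index table, then keep every
--     # element standing at an index other than its first occurrence.
--     first_index = {}
--     for i, x in enumerate(arr):
--         if x not in first_index:
--             first_index[x] = i
--     result = []
--     for i, x in enumerate(arr):
--         if first_index[x] != i:
--             result.append(x)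
--     return result
-- ===== Notes on version B (the rewrite author's own statement) =====
-- stated objective: alternative
-- what changed: Replaces A's single pass with a running seen-set by two passes: first build a dict mapping each value to its first-occurrence index, then filter the array keeping every element whose index differs from that first occurrence.
import Mathlib
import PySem

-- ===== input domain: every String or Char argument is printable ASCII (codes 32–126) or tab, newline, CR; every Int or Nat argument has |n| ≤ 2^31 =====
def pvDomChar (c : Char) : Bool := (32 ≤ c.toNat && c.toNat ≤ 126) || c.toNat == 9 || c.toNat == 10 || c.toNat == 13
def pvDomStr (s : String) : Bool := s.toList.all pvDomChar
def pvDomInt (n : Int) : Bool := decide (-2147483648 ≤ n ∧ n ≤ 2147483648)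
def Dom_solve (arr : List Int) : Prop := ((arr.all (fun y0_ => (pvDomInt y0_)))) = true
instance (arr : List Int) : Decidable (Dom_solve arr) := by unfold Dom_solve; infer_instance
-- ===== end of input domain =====

-- B replaces A's running seen-set pass by two passes (first-occurrence index table, then a filter); alternative decomposition, same cost.

-- ===== PORT A =====
def solve (arr : List Int) : List Int :=
  (arr.foldl
    (fun (st : PySem.Set Int × List Int) i =>
      (PySem.Set.add st.1 i, if PySem.Set.contains st.1 i then st.2 ++ [i] else st.2))
    (PySem.Set.empty, [])).2

-- ===== PORT B =====
def firstIndexB (arr : List Int) : PySem.Dict Int Int :=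
  (PySem.List.enumerate arr 0).foldl
    (fun d p => if d.contains p.2 then d else d.insert p.2 p.1) PySem.Dict.empty

def solve_alt (arr : List Int) : List Int :=
  -- Python's first_index[x] is a plain dict lookup; every x of arr is a key, so
  -- the default -1 of getD is never used and the port is exact.
  (PySem.List.enumerate arr 0).foldl
    (fun res p => if (firstIndexB arr).getD p.2 (-1) ≠ p.1 then res ++ [p.2] else res) []

-- ===== PRECONDITION & SPEC =====
def Spec_solve (arr : List Int) (out : List Int) : Prop := out = solve_alt arr
instance (arr : List Int) (out : List Int) : Decidable (Spec_solve arr out) := by unfold Spec_solve; infer_instance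

-- ===== CLAIM (what is proved, stated in full; the proofs are below) =====
def Claim_equal_solve : Prop := ∀ (arr : List Int), Dom_solve arr → Spec_solve arr (solve arr)

-- ===== LEMMAS AND PROOFS =====

/-- The common specification: the duplicates of the remaining list, given the prefix already seen. -/
def dups (pre : List Int) : List Int → List Int
  | [] => []
  | x :: rest => (if x ∈ pre then [x] else []) ++ dups (pre ++ [x]) rest

theorem foldA (xs : List Int) : ∀ (pre l : List Int),
    (xs.foldl
      (fun (st : PySem.Set Int × List Int) i =>
        (PySem.Set.add st.1 i, if PySem.Set.contains st.1 i then st.2 ++ [i] else st.2))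
      (PySem.Set.ofList pre, l)).2 = l ++ dups pre xs := by
  induction xs with
  | nil => intro pre l; simp [dups]
  | cons x rest ih =>
    intro pre l
    have hadd : PySem.Set.add (PySem.Set.ofList pre) x = PySem.Set.ofList (pre ++ [x]) := by
      rw [PySem.Set.ofList_eq_foldl, PySem.Set.ofList_eq_foldl, List.foldl_append]
      simp
    simp only [List.foldl_cons, dups]
    by_cases h : x ∈ pre
    · rw [if_pos ((PySem.Set.contains_iff _ _).mpr ((PySem.Set.mem_ofList _ _).mpr h)),
        hadd, ih (pre ++ [x]) (l ++ [x])]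
      simp [h]
    · rw [if_neg (fun hc => h ((PySem.Set.mem_ofList _ _).mp ((PySem.Set.contains_iff _ _).mp hc))),
        hadd, ih (pre ++ [x]) l]
      simp [h]

theorem fi_get (xs : List Int) : ∀ (s : Int) (d : PySem.Dict Int Int) (x : Int),
    ((PySem.List.enumerate xs s).foldl
      (fun d p => if d.contains p.2 then d else d.insert p.2 p.1) d).get? x
    = if d.contains x then d.get? x
      else (PySem.List.index? xs x).map (fun k => s + (k : Int)) := by
  induction xs with
  | nil =>
    intro s d x
    by_cases h : d.contains x = true
    · simp [h]
    · simp only [PySem.List.enumerate_nil, List.foldl_nil, h]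
      rw [(PySem.Dict.get?_eq_none_iff_contains _ _).mpr (by simp [h])]
      simp [PySem.List.index?_eq_idxOf?]
  | cons y rest ih =>
    intro s d x
    simp only [PySem.List.enumerate_cons, List.foldl_cons]
    by_cases hy : d.contains y = true
    · rw [if_pos hy, ih]
      by_cases hx : d.contains x = true
      · simp [hx]
      · have hne : y ≠ x := by intro he; rw [he] at hy; exact absurd hy (by simp [hx])
        rw [if_neg (by simp [hx]), if_neg (by simp [hx]),
          PySem.List.index?_cons_of_ne rest hne]
        cases hr : PySem.List.index? rest x with
        | none => simp
        | some k =>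
          simp
          ring
    · rw [if_neg hy, ih]
      by_cases hxy : x = y
      · subst hxy
        rw [if_pos (PySem.Dict.contains_insert_self _ _ _),
          PySem.Dict.get?_insert_self, if_neg hy, PySem.List.index?_cons_self]
        simp
      · have h1 : (d.insert y s).contains x = d.contains x := by
          rw [PySem.Dict.contains_insert]
          simp [hxy]
        rw [h1]
        by_cases hx : d.contains x = true
        · rw [if_pos hx, if_pos hx]
          exact PySem.Dict.get?_insert_of_ne d s hxy
        · rw [if_neg hx, if_neg hx, PySem.List.index?_cons_of_ne rest (Ne.symm hxy)]
          cases hr : PySem.List.index? rest x with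
          | none => simp
          | some k =>
            simp
            ring

/-- The key property of the first-occurrence table: the stored index differs from k
    exactly when arr[k] already occurred earlier. -/
theorem fi_cond (arr : List Int) (k : Nat) (hk : k < arr.length) :
    ((firstIndexB arr).getD arr[k] (-1) ≠ (k : Int)) ↔ arr[k] ∈ arr.take k := by
  have hmem : arr[k] ∈ arr := List.getElem_mem hk
  have hsome : (PySem.List.index? arr arr[k]).isSome :=
    (PySem.List.index?_isSome_iff _ _).mpr hmem
  obtain ⟨j, hj⟩ := Option.isSome_iff_exists.mp hsome
  obtain ⟨hjlen, hjval, hjmin⟩ := PySem.List.getElem_of_index?_eq_some hj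
  have hget : (firstIndexB arr).get? arr[k] = some ((j : Int)) := by
    unfold firstIndexB
    rw [fi_get, if_neg (by simp), hj]
    simp
  have hgd : (firstIndexB arr).getD arr[k] (-1) = (j : Int) := by
    rw [PySem.Dict.getD_eq_get?_getD, hget]; rfl
  rw [hgd]
  have hjk : j ≤ k := by
    by_contra h
    exact hjmin k (by omega) rfl
  constructor
  · intro hne
    have hjk' : j < k := by
      rcases Nat.lt_or_ge j k with h | h
      · exact h
      · exfalso; apply hne; congr 1; omega
    have hmj : arr[j] ∈ arr.take k := by
      rw [List.mem_take_iff_getElem]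
      exact ⟨j, by omega, rfl⟩
    rwa [hjval] at hmj
  · intro hmemtake hne
    have hjk' : j = k := by exact_mod_cast hne
    subst hjk'
    rw [List.mem_take_iff_getElem] at hmemtake
    obtain ⟨i, hi, hiv⟩ := hmemtake
    exact hjmin i (by omega) hiv

theorem foldB (arr : List Int) (xs : List Int) : ∀ (s : Int) (pre acc : List Int),
    (∀ (k : Nat) (h : k < xs.length),
      (((firstIndexB arr).getD xs[k] (-1) ≠ s + (k : Int)) ↔ xs[k] ∈ pre ++ xs.take k)) →
    (PySem.List.enumerate xs s).foldl
      (fun res p => if (firstIndexB arr).getD p.2 (-1) ≠ p.1 then res ++ [p.2] else res) acc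
    = acc ++ dups pre xs := by
  induction xs with
  | nil => intro s pre acc _; simp [dups]
  | cons x rest ih =>
    intro s pre acc hyp
    simp only [PySem.List.enumerate_cons, List.foldl_cons, dups]
    have h0 := hyp 0 (by simp)
    simp only [List.getElem_cons_zero, List.take_zero, List.append_nil, Nat.cast_zero,
      add_zero] at h0
    have hrec : ∀ (k : Nat) (h : k < rest.length),
        (((firstIndexB arr).getD rest[k] (-1) ≠ (s + 1) + (k : Int)) ↔
          rest[k] ∈ (pre ++ [x]) ++ rest.take k) := by
      intro k h
      have h2 := hyp (k + 1) (by simpa using Nat.succ_lt_succ h)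
      simp only [List.getElem_cons_succ, List.take_succ_cons] at h2
      have e : s + (((k : Nat) + 1 : Nat) : Int) = (s + 1) + (k : Int) := by push_cast; ring
      rw [e] at h2
      rw [List.append_assoc, List.singleton_append]
      exact h2
    by_cases h : x ∈ pre
    · rw [if_pos (h0.mpr h), ih (s + 1) (pre ++ [x]) (acc ++ [x]) hrec]
      simp [h]
    · rw [if_neg (fun hne => h (h0.mp hne)), ih (s + 1) (pre ++ [x]) acc hrec]
      simp [h]

theorem solve_eq_dups (arr : List Int) : solve arr = dups [] arr := by
  have h := foldA arr [] []
  simpa [solve, PySem.Set.ofList] using h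

theorem solve_alt_eq_dups (arr : List Int) : solve_alt arr = dups [] arr := by
  unfold solve_alt
  rw [foldB arr arr 0 [] []]
  · simp
  · intro k hk
    simpa using fi_cond arr k hk

-- ===== VERDICT (by name: the statement is the Claim_ definition above) =====
theorem solve_spec : Claim_equal_solve := by
  intro arr _
  unfold Spec_solve
  rw [solve_eq_dups, solve_alt_eq_dups]
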